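-- pv_equiv track=rewrite | github.com/mozilla-releng/scriptworker | scriptworker/utils.py | get_loggable_url
-- ===== SOURCE A (Python) =====
-- def get_loggable_url(url):
--     """Strip out secrets from taskcluster urls.
--
--     Args:
--         url (str): the url to strip
--
--     Returns:
--         str: the loggable url
--
--     """
--     loggable_url = url or ""
--     for secret_string in ("bewit=", "AWSAccessKeyId=", "access_token="):
--         parts = loggable_url.split(secret_string)
--         loggable_url = parts[0]
--     if loggable_url != url:
--         loggable_url = "{}<snip>".format(loggable_url)
--     return loggable_url
-- ===== SOURCE B (Python) =====
-- def get_loggable_url(url):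
--     """Strip out secrets from taskcluster urls.
--
--     Args:
--         url (str): the url to strip
--
--     Returns:
--         str: the loggable url
--
--     """
--     base = url or ""
--     loggable_url = base
--     for i in range(len(base)):
--         if base.startswith(("bewit=", "AWSAccessKeyId=", "access_token="), i):
--             loggable_url = base[:i]
--             break
--     if loggable_url != url:
--         loggable_url = "{}<snip>".format(loggable_url)
--     return loggable_url
-- ===== Notes on version B (the rewrite author's own statement) =====
-- stated objective: alternative
-- what changed: Replaces A's three sequential split-and-keep-first passes (one per secret token, each re-splitting the remaining string) by one left-to-right scan that stops at the first index where any secret token starts (str.startswith with a tuple) and slices the string there once, keeping the original <snip> guard against the untouched url argument.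
import Mathlib
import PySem

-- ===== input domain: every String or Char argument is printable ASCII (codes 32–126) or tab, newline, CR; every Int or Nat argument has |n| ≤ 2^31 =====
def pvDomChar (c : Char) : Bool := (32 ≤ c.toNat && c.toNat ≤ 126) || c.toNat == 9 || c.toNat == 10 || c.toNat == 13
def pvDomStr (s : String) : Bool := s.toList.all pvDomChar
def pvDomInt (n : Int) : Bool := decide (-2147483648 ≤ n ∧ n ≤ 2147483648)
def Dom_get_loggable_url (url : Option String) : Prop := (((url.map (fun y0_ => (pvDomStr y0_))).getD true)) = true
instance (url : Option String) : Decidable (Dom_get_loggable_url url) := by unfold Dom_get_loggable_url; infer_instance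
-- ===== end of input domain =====

-- B replaces A's three sequential split-and-keep-first passes by one left-to-right scan
-- that stops at the first index where any secret token starts (objective: alternative).

-- ===== PORT A =====
def get_loggable_url (url : Option String) : String :=
  let base := url.getD ""          -- url or ""
  let loggable := ["bewit=", "AWSAccessKeyId=", "access_token="].foldl
    (fun l secret_string =>
      let parts := (PySem.Str.split? l secret_string).getD []   -- secret strings are non-empty, so split? is some
      (PySem.List.pyGet? parts 0).getD "")                      -- parts[0]; split always yields a non-empty list
    base
  if url ≠ some loggable then loggable ++ "<snip>" else loggable

-- ===== PORT B =====
-- base.startswith(("bewit=", "AWSAccessKeyId=", "access_token="), i) on the suffix base[i:]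
def bHit (l : List Char) : Bool :=
  "bewit=".toList.isPrefixOf l || "AWSAccessKeyId=".toList.isPrefixOf l || "access_token=".toList.isPrefixOf l

-- the `for i in range(len(base))` loop with its break: rest = base[i:]; on the first
-- hit return base[:i] (0 ≤ i ≤ len, so the slice is take i — exact), else fall through to base
def bScan (base : List Char) : List Char → Nat → List Char
  | [], _ => base
  | c :: tail, i => if bHit (c :: tail) then base.take i else bScan base tail (i + 1)

def get_loggable_url_alt (url : Option String) : String :=
  let base := url.getD ""          -- url or ""
  let loggable := String.ofList (bScan base.toList base.toList 0)
  if url ≠ some loggable then loggable ++ "<snip>" else loggable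

-- ===== PRECONDITION & SPEC =====
def Spec_get_loggable_url (url : Option String) (out : String) : Prop := out = get_loggable_url_alt url
instance (url : Option String) (out : String) : Decidable (Spec_get_loggable_url url out) := by unfold Spec_get_loggable_url; infer_instance

-- ===== CLAIM (what is proved, stated in full; the proofs are below) =====
def Claim_equal_get_loggable_url : Prop := ∀ (url : Option String), Dom_get_loggable_url url → Spec_get_loggable_url url (get_loggable_url url)

-- ===== LEMMAS AND PROOFS =====

-- `pvPre sep l` = the part of l before the first occurrence of sep (all of l if none): the head of l.split(sep).
def pvPre (sep : List Char) : List Char → List Char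
  | [] => []
  | c :: rest => if sep.isPrefixOf (c :: rest) then [] else c :: pvPre sep rest

-- `pvM s` = first index of s at which a secret string starts (s.length if none).
def pvM : List Char → Nat
  | [] => 0
  | c :: rest => if bHit (c :: rest) then 0 else pvM rest + 1

theorem pvM_le (s : List Char) : pvM s ≤ s.length := by
  induction s with
  | nil => simp [pvM]
  | cons c rest ih => simp only [pvM]; split <;> simp <;> omega

theorem pvM_lower (s : List Char) : ∀ i < pvM s, bHit (s.drop i) = false := by
  induction s with
  | nil => simp [pvM]
  | cons c rest ih =>
    intro i hi
    simp only [pvM] at hi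
    split at hi
    · omega
    · cases i with
      | zero => simpa using ‹¬ bHit (c :: rest) = true›
      | succ j => simpa using ih j (by omega)

theorem pvM_hit (s : List Char) : bHit (s.drop (pvM s)) = true ∨ pvM s = s.length := by
  induction s with
  | nil => simp [pvM]
  | cons c rest ih =>
    simp only [pvM]
    split
    · left; simpa
    · rcases ih with h | h
      · left; simpa using h
      · right; simp [h]

theorem pvM_eq (s : List Char) (k : Nat) (hk : k ≤ s.length)
    (hHit : bHit (s.drop k) = true ∨ k = s.length)
    (hlow : ∀ i < k, bHit (s.drop i) = false) : pvM s = k := by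
  rcases Nat.lt_trichotomy (pvM s) k with h | h | h
  · rcases pvM_hit s with hh | hh
    · rw [hlow (pvM s) h] at hh; cases hh
    · have := pvM_le s; omega
  · exact h
  · rcases hHit with hh | hh
    · rw [pvM_lower s k h] at hh; cases hh
    · have := pvM_le s; omega

theorem pv_go_acc (sep : List Char) : ∀ (fuel : Nat) (l cur : List Char) (acc : List (List Char)),
    PySem.Chars.splitOn.go sep fuel l cur acc = acc.reverse ++ PySem.Chars.splitOn.go sep fuel l cur [] := by
  intro fuel
  induction fuel with
  | zero => intro l cur acc; simp [PySem.Chars.splitOn.go]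
  | succ f ih =>
    intro l cur acc
    cases l with
    | nil => simp [PySem.Chars.splitOn.go]
    | cons c rest =>
      rw [PySem.Chars.splitOn.go, PySem.Chars.splitOn.go]
      split
      · rw [ih, ih (List.drop sep.length (c :: rest)) [] [cur.reverse]]
        simp
      · exact ih rest (c :: cur) acc

theorem pv_go_head (sep : List Char) : ∀ (fuel : Nat) (l cur : List Char), l.length < fuel →
    (PySem.Chars.splitOn.go sep fuel l cur []).head? = some (cur.reverse ++ pvPre sep l) := by
  intro fuel
  induction fuel with
  | zero => intro l cur h; omega
  | succ f ih =>
    intro l cur h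
    cases l with
    | nil => simp [PySem.Chars.splitOn.go, pvPre]
    | cons c rest =>
      rw [PySem.Chars.splitOn.go]
      simp only [pvPre]
      split
      · rw [pv_go_acc]
        simp
      · rw [ih rest (c :: cur) (by simp at h ⊢; omega)]
        simp

theorem pv_splitOn_head (s sep : List Char) :
    (PySem.Chars.splitOn s sep).head? = some (pvPre sep s) := by
  have := pv_go_head sep (s.length + 1) s [] (by omega)
  simpa [PySem.Chars.splitOn] using this

theorem pvPre_of_no_occ (sep l : List Char) (h : ∀ i, ¬ sep <+: l.drop i) : pvPre sep l = l := by
  induction l with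
  | nil => simp [pvPre]
  | cons c rest ih =>
    have h0 : ¬ sep.isPrefixOf (c :: rest) = true := by
      rw [List.isPrefixOf_iff_prefix]; exact fun hp => h 0 (by simpa using hp)
    simp only [pvPre, if_neg h0]
    rw [ih (fun i hp => h (i + 1) (by simpa using hp))]

theorem pvPre_of_first (sep l : List Char) (k : Nat) (h1 : sep <+: l.drop k)
    (h2 : ∀ i < k, ¬ sep <+: l.drop i) : pvPre sep l = l.take k := by
  induction l generalizing k with
  | nil => simp [pvPre]
  | cons c rest ih =>
    cases k with
    | zero =>
      have : sep.isPrefixOf (c :: rest) = true := by rw [List.isPrefixOf_iff_prefix]; simpa using h1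
      simp [pvPre, this]
    | succ j =>
      have h0 : ¬ sep.isPrefixOf (c :: rest) = true := by
        rw [List.isPrefixOf_iff_prefix]; exact fun hp => h2 0 (by omega) (by simpa using hp)
      simp only [pvPre, if_neg h0, List.take_succ_cons]
      rw [ih j (by simpa using h1) (fun i hi => by simpa using h2 (i + 1) (by omega))]

-- `pvCut l sep` = index of first occurrence of sep in l, l.length if none.
def pvCut (l sep : List Char) : Nat :=
  if PySem.Chars.find l sep = -1 then l.length else (PySem.Chars.find l sep).toNat

theorem pvCut_le (l sep : List Char) : pvCut l sep ≤ l.length := by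
  unfold pvCut; split
  · exact le_rfl
  · have := PySem.Chars.find_le_length l sep; omega

theorem pvPre_eq_take_cut (l sep : List Char) : pvPre sep l = l.take (pvCut l sep) := by
  unfold pvCut; split
  · rename_i h
    rw [pvPre_of_no_occ sep l, List.take_length]
    intro i hp
    exact (PySem.Chars.find_eq_neg_one_iff l sep).mp h
      ((PySem.Chars.isIn_iff_infix sep l).mp ((PySem.Chars.exists_prefix_drop_iff_isIn sep l).mp ⟨i, hp⟩))
  · rename_i h
    have h0 : 0 ≤ PySem.Chars.find l sep := by have := PySem.Chars.neg_one_le_find l sep; omega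
    obtain ⟨ha, hb⟩ := PySem.Chars.find_spec h0
    exact pvPre_of_first sep l _ ha hb

theorem pvCut_no_below (l sep : List Char) : ∀ i < pvCut l sep, ¬ sep <+: l.drop i := by
  unfold pvCut; split
  · rename_i h
    intro i _ hp
    exact (PySem.Chars.find_eq_neg_one_iff l sep).mp h
      ((PySem.Chars.isIn_iff_infix sep l).mp ((PySem.Chars.exists_prefix_drop_iff_isIn sep l).mp ⟨i, hp⟩))
  · rename_i h
    have h0 : 0 ≤ PySem.Chars.find l sep := by have := PySem.Chars.neg_one_le_find l sep; omega
    exact (PySem.Chars.find_spec h0).2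

theorem pvCut_at (l sep : List Char) : sep <+: l.drop (pvCut l sep) ∨ pvCut l sep = l.length := by
  unfold pvCut; split
  · right; rfl
  · rename_i h
    have h0 : 0 ≤ PySem.Chars.find l sep := by have := PySem.Chars.neg_one_le_find l sep; omega
    left; exact (PySem.Chars.find_spec h0).1

theorem pv_prefix_getElem? (sep s : List Char) (i p : Nat) (h : sep <+: s.drop i)
    (h1 : i ≤ p) (h2 : p < i + sep.length) : s[p]? = sep[p - i]? := by
  obtain ⟨t, ht⟩ := h
  have e1 : s[p]? = (s.drop i)[p - i]? := by rw [List.getElem?_drop]; congr 1; omega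
  rw [e1, ← ht, List.getElem?_append_left (by omega)]

theorem pv_mem_drop_one (l : List Char) (j : Nat) (x : Char) (h : l[j]? = some x) (hj : 1 ≤ j) :
    x ∈ l.drop 1 := by
  have e : (l.drop 1)[j - 1]? = l[j]? := by rw [List.getElem?_drop]; congr 1; omega
  exact List.mem_of_getElem? (e.trans h)

theorem bHit_false_of (s : List Char) (i : Nat)
    (n1 : ¬ "bewit=".toList <+: s.drop i)
    (n2 : ¬ "AWSAccessKeyId=".toList <+: s.drop i)
    (n3 : ¬ "access_token=".toList <+: s.drop i) : bHit (s.drop i) = false := by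
  have hb : ∀ (a : List Char), ¬ a <+: s.drop i → a.isPrefixOf (s.drop i) = false := fun a h =>
    Bool.eq_false_iff.mpr (fun ht => h (List.isPrefixOf_iff_prefix.mp ht))
  simp only [bHit, Bool.or_eq_false_iff]
  exact ⟨⟨hb _ n1, hb _ n2⟩, hb _ n3⟩

theorem bHit_true_of (l : List Char)
    (h : "bewit=".toList <+: l ∨ "AWSAccessKeyId=".toList <+: l ∨ "access_token=".toList <+: l) :
    bHit l = true := by
  simp only [bHit, Bool.or_eq_true]
  rcases h with h | h | h
  · exact Or.inl (Or.inl (List.isPrefixOf_iff_prefix.mpr h))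
  · exact Or.inl (Or.inr (List.isPrefixOf_iff_prefix.mpr h))
  · exact Or.inr (List.isPrefixOf_iff_prefix.mpr h)

theorem chainA (s : List Char) :
    pvPre "access_token=".toList (pvPre "AWSAccessKeyId=".toList (pvPre "bewit=".toList s))
      = s.take (pvM s) := by
  have hC1 : ("bewit=".toList).length = 6 := by decide
  have hC2 : ("AWSAccessKeyId=".toList).length = 15 := by decide
  have hC3 : ("access_token=".toList).length = 13 := by decide
  set n1 := pvCut s "bewit=".toList with hn1
  have hn1le : n1 ≤ s.length := pvCut_le s _
  rw [pvPre_eq_take_cut s "bewit=".toList, ← hn1]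
  set s1 := s.take n1 with hs1
  have hs1len : s1.length = n1 := by rw [hs1, List.length_take]; omega
  set n2 := pvCut s1 "AWSAccessKeyId=".toList with hn2
  have hn2le : n2 ≤ n1 := hs1len ▸ pvCut_le s1 _
  rw [pvPre_eq_take_cut s1 "AWSAccessKeyId=".toList, ← hn2]
  have e2 : s1.take n2 = s.take n2 := by
    rw [hs1, List.take_take]; congr 1; omega
  rw [e2]
  set s2 := s.take n2 with hs2
  have hs2len : s2.length = n2 := by rw [hs2, List.length_take]; omega
  set n3 := pvCut s2 "access_token=".toList with hn3
  have hn3le : n3 ≤ n2 := hs2len ▸ pvCut_le s2 _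
  rw [pvPre_eq_take_cut s2 "access_token=".toList, ← hn3]
  have e3 : s2.take n3 = s.take n3 := by
    rw [hs2, List.take_take]; congr 1; omega
  rw [e3]
  have hM : pvM s = n3 := by
    apply pvM_eq s n3 (by omega)
    · -- at n3 a secret starts, or n3 = s.length
      rcases pvCut_at s2 "access_token=".toList with h | h
      · left
        apply bHit_true_of
        refine Or.inr (Or.inr ?_)
        rw [hs2, List.drop_take] at h
        exact (List.prefix_take_iff.mp h).1
      · have hn3n2 : n3 = n2 := by rw [hn3, h, hs2len]
        rcases pvCut_at s1 "AWSAccessKeyId=".toList with h2 | h2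
        · left
          apply bHit_true_of
          refine Or.inr (Or.inl ?_)
          rw [hs1, List.drop_take] at h2
          rw [hn3n2]
          exact (List.prefix_take_iff.mp h2).1
        · have hn2n1 : n2 = n1 := by rw [hn2, h2, hs1len]
          rcases pvCut_at s "bewit=".toList with h3 | h3
          · left
            apply bHit_true_of
            rw [hn3n2, hn2n1]
            exact Or.inl h3
          · right; omega
    · -- below n3 no secret starts
      intro i hi
      apply bHit_false_of
      · -- bewit=
        exact fun hp => pvCut_no_below s "bewit=".toList i (by omega) hp
      · -- AWSAccessKeyId=
        intro hp
        have hlen : i + 15 ≤ s.length := by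
          have := hp.length_le; simp only [List.length_drop] at this; omega
        by_cases hcase : i + 15 ≤ n1
        · have hin : "AWSAccessKeyId=".toList <+: s1.drop i := by
            rw [hs1, List.drop_take]
            exact List.prefix_take_iff.mpr ⟨hp, by omega⟩
          exact pvCut_no_below s1 "AWSAccessKeyId=".toList i (by omega) hin
        · -- straddles the bewit= cut at n1
          rcases pvCut_at s "bewit=".toList with hA | hA
          · have e1 : s[n1]? = ("bewit=".toList)[0]? := by
              have := pv_prefix_getElem? _ s n1 n1 hA le_rfl (by omega)
              simpa using this
            have e2' : s[n1]? = ("AWSAccessKeyId=".toList)[n1 - i]? :=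
              pv_prefix_getElem? _ s i n1 hp (by omega) (by omega)
            have hmem : 'b' ∈ ("AWSAccessKeyId=".toList).drop 1 := by
              apply pv_mem_drop_one _ (n1 - i)
              · rw [← e2', e1]; decide
              · omega
            exact absurd hmem (by decide)
          · omega
      · -- access_token=
        intro hp
        have hlen : i + 13 ≤ s.length := by
          have := hp.length_le; simp only [List.length_drop] at this; omega
        by_cases hcase : i + 13 ≤ n2
        · have hin : "access_token=".toList <+: s2.drop i := by
            rw [hs2, List.drop_take]
            exact List.prefix_take_iff.mpr ⟨hp, by omega⟩
          exact pvCut_no_below s2 "access_token=".toList i (by omega) hin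
        · -- straddles the cut at n2
          have eC : s[n2]? = ("access_token=".toList)[n2 - i]? :=
            pv_prefix_getElem? _ s i n2 hp (by omega) (by omega)
          rcases pvCut_at s1 "AWSAccessKeyId=".toList with hB | hB
          · have hlt : n2 < n1 := by
              have := hB.length_le; simp only [List.length_drop, hs1len] at this; omega
            have eA : s1[n2]? = ("AWSAccessKeyId=".toList)[0]? := by
              have := pv_prefix_getElem? _ s1 n2 n2 hB le_rfl (by omega)
              simpa using this
            have eB : s1[n2]? = s[n2]? := by rw [hs1]; exact List.getElem?_take_of_lt hlt
            have hmem : 'A' ∈ ("access_token=".toList).drop 1 := by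
              apply pv_mem_drop_one _ (n2 - i)
              · rw [← eC, ← eB, eA]; decide
              · omega
            exact absurd hmem (by decide)
          · have hn2n1 : n2 = n1 := by rw [hn2, hB, hs1len]
            rcases pvCut_at s "bewit=".toList with hA | hA
            · have e1 : s[n1]? = ("bewit=".toList)[0]? := by
                have := pv_prefix_getElem? _ s n1 n1 hA le_rfl (by omega)
                simpa using this
              have hmem : 'b' ∈ ("access_token=".toList).drop 1 := by
                apply pv_mem_drop_one _ (n2 - i)
                · rw [← eC, hn2n1, e1]; decide
                · omega
              exact absurd hmem (by decide)
            · omega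
  rw [hM]

theorem pv_stepA (l sec : String) (hsec : sec.toList ≠ []) :
    (PySem.List.pyGet? ((PySem.Str.split? l sec).getD []) 0).getD "" = String.ofList (pvPre sec.toList l.toList) := by
  have hsp : PySem.Str.split? l sec
      = some ((PySem.Chars.splitOn l.toList sec.toList).map String.ofList) := by
    simp [PySem.Str.split?, PySem.Chars.split?, List.isEmpty_iff, hsec]
  rw [hsp, Option.getD_some]
  have hid : (PySem.Chars.splitOn l.toList sec.toList)[0]? = some (pvPre sec.toList l.toList) := by
    rw [← List.head?_eq_getElem?, pv_splitOn_head]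
  have hlen : 0 < (PySem.Chars.splitOn l.toList sec.toList).length :=
    (List.getElem?_eq_some_iff.mp hid).1
  simp only [PySem.List.pyGet?, PySem.List.pyIdx?]
  obtain ⟨hl2, he⟩ := List.getElem?_eq_some_iff.mp hid
  simp [hlen, List.getElem?_map, he]

theorem pv_coreA (t : String) :
    (["bewit=", "AWSAccessKeyId=", "access_token="].foldl
      (fun l secret_string =>
        (PySem.List.pyGet? ((PySem.Str.split? l secret_string).getD []) 0).getD "") t)
      = String.ofList (t.toList.take (pvM t.toList)) := by
  simp only [List.foldl_cons, List.foldl_nil]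
  rw [pv_stepA t "bewit=" (by decide), pv_stepA _ "AWSAccessKeyId=" (by decide),
      pv_stepA _ "access_token=" (by decide)]
  simp only [String.toList_ofList]
  exact congrArg String.ofList (chainA t.toList)

theorem bScan_eq (base : List Char) : ∀ (rest : List Char) (i : Nat), rest = base.drop i →
    bScan base rest i = base.take (i + pvM rest) := by
  intro rest
  induction rest with
  | nil =>
    intro i h
    have hlen : base.length ≤ i := by
      have := congrArg List.length h
      simp only [List.length_drop, List.length_nil] at this
      omega
    simp only [bScan, pvM]
    rw [List.take_of_length_le (by omega : base.length ≤ i + 0)]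
  | cons c tail ih =>
    intro i h
    simp only [bScan, pvM]
    split
    · rfl
    · rw [ih (i + 1) (by rw [← List.drop_drop, ← h]; rfl)]
      congr 1
      omega

theorem pv_coreB (t : String) :
    String.ofList (bScan t.toList t.toList 0) = String.ofList (t.toList.take (pvM t.toList)) := by
  rw [bScan_eq t.toList t.toList 0 (by simp), Nat.zero_add]

-- ===== VERDICT (by name: the statement is the Claim_ definition above) =====
theorem get_loggable_url_spec : Claim_equal_get_loggable_url := by
  intro url _
  unfold Spec_get_loggable_url
  simp only [get_loggable_url, get_loggable_url_alt]
  rw [pv_coreA (url.getD ""), pv_coreB (url.getD "")]
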